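-- pv_equiv track=rewrite | github.com/ouzdeville/AbgebraicCode | matrice.py | matg
-- ===== SOURCE A (Python) =====
-- def theta(x):
--     return x*x
--
-- def thev(p):
--     s=[]
--     n=len(p)
--     for i in range(n):
--         s.append(theta(p[i]))
--     return s
--
-- def matg(p, k):
--         n=len(p)
--         a=p
--         s=[a]
--         for i in range(k-1):
--             a = [0] + thev(a)
--             del(a[n])
--             s.append(a)
--         return s
-- ===== SOURCE B (Python) =====
-- def matg(p, k):
--     # Closed form: row i is min(i, n) leading zeros followed by the surviving
--     # entries of p raised to the 2**i-th power (exact integer pow). Each row is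
--     # computed independently from p -- no state carried between rows.
--     n = len(p)
--     return [[0] * min(i, n) + [v ** (2 ** i) for v in p[:max(n - i, 0)]]
--             for i in range(max(k, 1))]
-- ===== Notes on version B (the rewrite author's own statement) =====
-- stated objective: alternative
-- what changed: B replaces A's stateful loop (square the whole previous row, prepend a zero, delete the last entry, append) by a stateless closed form: row i is computed directly from p as min(i,n) zeros followed by p[j]**(2**i), so rows are independent and nothing is squared repeatedly or mutated.
import Mathlib
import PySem

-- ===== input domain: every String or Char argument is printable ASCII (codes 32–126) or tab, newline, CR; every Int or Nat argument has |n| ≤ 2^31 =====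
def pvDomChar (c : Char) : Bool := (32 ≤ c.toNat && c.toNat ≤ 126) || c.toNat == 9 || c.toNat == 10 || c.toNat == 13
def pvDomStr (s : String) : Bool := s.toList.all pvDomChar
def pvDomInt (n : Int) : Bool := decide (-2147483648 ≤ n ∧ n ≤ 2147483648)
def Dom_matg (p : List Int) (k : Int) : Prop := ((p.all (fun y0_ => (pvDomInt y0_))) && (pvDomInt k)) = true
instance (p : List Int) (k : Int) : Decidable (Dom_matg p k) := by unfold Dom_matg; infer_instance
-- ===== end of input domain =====

-- B replaces A's stateful square/shift/delete loop by a stateless closed form: row i is built directly from p as min(i,n) zeros plus p[j]**(2**i).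

-- ===== PORT A =====
def theta (x : Int) : Int := x * x

-- for i in range(len(p)): s.append(theta(p[i]))  — index i is always in range, pyGetD is exact there
def thev (p : List Int) : List Int :=
  (PySem.List.pyRange 0 (p.length : Int) 1).foldl
    (fun s i => s ++ [theta (PySem.List.pyGetD p i 0)]) []

-- loop body: a = [0] + thev(a); del a[n]; s.append(a)
def matgStep (n : Int) (st : List Int × List (List Int)) (_i : Int) :
    List Int × List (List Int) :=
  let a0 := 0 :: thev st.1
  let a := match PySem.List.pop? a0 n with   -- del a[n]; a0 always has length n+1, so it succeeds
    | some r => r.2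
    | none => a0
  (a, st.2 ++ [a])

def matg (p : List Int) (k : Int) : List (List Int) :=
  ((PySem.List.pyRange 0 (k - 1) 1).foldl (matgStep (p.length : Int)) (p, [p])).2

-- ===== PORT B =====
-- closed form per row: [[0]*min(i,n) + [v ** (2**i) for v in p[:max(n-i,0)]] for i in range(max(k,1))]
def matg_alt (p : List Int) (k : Int) : List (List Int) :=
  (PySem.List.pyRange 0 (max k 1) 1).map (fun i =>
    List.replicate (min i (p.length : Int)).toNat 0 ++
      (PySem.List.slice p none (some (max ((p.length : Int) - i) 0))).map
        (fun v => v ^ (2 ^ i.toNat)))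

-- ===== PRECONDITION & SPEC =====
def Spec_matg (p : List Int) (k : Int) (out : List (List Int)) : Prop := out = matg_alt p k
instance (p : List Int) (k : Int) (out : List (List Int)) : Decidable (Spec_matg p k out) := by unfold Spec_matg; infer_instance

-- ===== CLAIM (what is proved, stated in full; the proofs are below) =====
def Claim_equal_matg : Prop := ∀ (p : List Int) (k : Int), Dom_matg p k → Spec_matg p k (matg p k)

-- ===== LEMMAS AND PROOFS =====

-- closed form: row j has min(j,n) leading zeros then the first n-j elements squared j times
def rowF (p : List Int) (j : Nat) : List Int :=
  List.replicate (min j p.length) 0 ++ (p.take (p.length - j)).map (theta^[j])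

def rowsF (p : List Int) (j : Nat) : List (List Int) := (List.range (j+1)).map (rowF p)

lemma foldl_append_map (f : Int → Int) (q : List Int) :
    ∀ init, q.foldl (fun s x => s ++ [f x]) init = init ++ q.map f := by
  induction q with
  | nil => intro init; simp
  | cons x xs ih => intro init; simp [ih]

lemma thev_eq (q : List Int) : thev q = q.map theta := by
  unfold thev
  rw [PySem.List.foldl_pyRange_zero_pyGetD' q 0 (fun s x => s ++ [theta x]) []]
  simpa using foldl_append_map theta q []

lemma rowF_zero (p : List Int) : rowF p 0 = p := by
  simp [rowF]

lemma rowsF_zero (p : List Int) : rowsF p 0 = [p] := by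
  simp [rowsF, rowF_zero]

lemma rowsF_succ (p : List Int) (j : Nat) :
    rowsF p (j+1) = rowsF p j ++ [rowF p (j+1)] := by
  simp [rowsF, List.range_succ]

lemma length_rowF (p : List Int) (j : Nat) : (rowF p j).length = p.length := by
  simp [rowF]; omega

lemma erase_rowF (p : List Int) (j : Nat) :
    (0 :: (rowF p j).map theta).eraseIdx p.length = rowF p (j+1) := by
  have hcomp : theta ∘ theta^[j] = theta^[j+1] := (Function.iterate_succ' theta j).symm
  unfold rowF
  rw [List.map_append, List.map_replicate, show theta 0 = 0 from rfl, List.map_map, hcomp]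
  have hL : ((0:Int) :: (List.replicate (min j p.length) 0 ++ (p.take (p.length - j)).map (theta^[j+1])))
      = List.replicate (min j p.length + 1) 0 ++ (p.take (p.length - j)).map (theta^[j+1]) := by
    simp [List.replicate_succ]
  rw [hL]
  rw [List.eraseIdx_eq_take_drop_succ]
  have hdrop : (List.replicate (min j p.length + 1) 0 ++ (p.take (p.length - j)).map (theta^[j+1])).drop (p.length+1) = [] := by
    apply List.drop_eq_nil_of_le; simp; omega
  rw [hdrop, List.append_nil, List.take_append]
  by_cases h : j < p.length
  · have h1 : min j p.length = j := by omega
    have h2 : min (j+1) p.length = j+1 := by omega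
    rw [h1, h2, List.take_replicate, List.length_replicate]
    rw [← List.map_take, List.take_take]
    have h3 : min p.length (j+1) = j+1 := by omega
    have h4 : min (p.length - (j+1)) (p.length - j) = p.length - (j+1) := by omega
    rw [h3, h4]
  · have h1 : min j p.length = p.length := by omega
    have h2 : min (j+1) p.length = p.length := by omega
    have h3 : p.length - j = 0 := by omega
    have h4 : p.length - (j+1) = 0 := by omega
    simp [h1, h2, h3, h4, List.take_replicate]

lemma stepA_eq (p : List Int) (j : Nat) (r : List (List Int)) (i : Int) :
    matgStep (p.length : Int) (rowF p j, r) i = (rowF p (j+1), r ++ [rowF p (j+1)]) := by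
  unfold matgStep
  simp only [thev_eq]
  have hlen : p.length < ((0:Int) :: (rowF p j).map theta).length := by
    simp [length_rowF]
  rw [PySem.List.pop?_natCast _ _ hlen]
  simp only [erase_rowF]

lemma foldA (p : List Int) (l : List Int) (j : Nat) :
    l.foldl (matgStep (p.length : Int)) (rowF p j, rowsF p j)
      = (rowF p (j + l.length), rowsF p (j + l.length)) := by
  induction l generalizing j with
  | nil => simp
  | cons x xs ih =>
      simp only [List.foldl_cons]
      rw [stepA_eq, ← rowsF_succ, ih (j+1)]
      have e : j + 1 + xs.length = j + (x :: xs).length := by simp; omega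
      rw [e]

def intRange (a : Int) : Nat → List Int
  | 0 => []
  | m+1 => a :: intRange (a+1) m

lemma pyRange_eq_intRange (a b : Int) :
    PySem.List.pyRange a b 1 = intRange a (b - a).toNat := by
  suffices h : ∀ (m : Nat) (a b : Int), (b - a).toNat = m → PySem.List.pyRange a b 1 = intRange a m from
    h _ a b rfl
  intro m
  induction m with
  | zero => intro a b h; rw [PySem.List.pyRange_one_eq_nil (by omega)]; rfl
  | succ m ih =>
      intro a b h
      rw [PySem.List.pyRange_one_cons (by omega)]
      simp only [intRange]
      rw [ih (a+1) b (by omega)]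

lemma intRange_eq_range (a : Int) (m : Nat) :
    intRange a m = (List.range m).map (fun j => a + (j : Nat)) := by
  induction m generalizing a with
  | zero => simp [intRange]
  | succ m ih =>
      rw [List.range_succ_eq_map]
      simp only [intRange, ih, List.map_cons, List.map_map]
      congr 1
      · simp
      · apply List.map_congr_left
        intro x _
        simp only [Function.comp_apply]
        push_cast
        ring

lemma theta_iterate (j : Nat) : (fun v : Int => v ^ (2 ^ j)) = theta^[j] := by
  induction j with
  | zero => funext v; simp
  | succ j ih =>
      funext v
      rw [Function.iterate_succ', Function.comp_apply, ← ih]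
      simp only [theta]
      rw [← pow_add, pow_succ]; ring_nf

lemma rowB_eq (p : List Int) (j : Nat) :
    List.replicate (min ((j:Int)) (p.length : Int)).toNat 0 ++
      (PySem.List.slice p none (some (max ((p.length : Int) - (j:Int)) 0))).map
        (fun v => v ^ (2 ^ ((j:Int)).toNat))
    = rowF p j := by
  rw [PySem.List.slice_to _ (le_max_right _ _)]
  have h1 : (min ((j:Int)) (p.length : Int)).toNat = min j p.length := by omega
  have h2 : (max ((p.length : Int) - (j:Int)) 0).toNat = p.length - j := by omega
  have h3 : ((j:Int)).toNat = j := by omega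
  rw [h1, h2, h3, theta_iterate j]
  rfl

lemma matg_eq (p : List Int) (k : Int) : matg p k = rowsF p (k-1).toNat := by
  unfold matg
  rw [show (p, ([p] : List (List Int))) = (rowF p 0, rowsF p 0) by rw [rowF_zero, rowsF_zero]]
  rw [foldA p _ 0]
  simp [PySem.List.length_pyRange_one]

lemma matg_alt_eq (p : List Int) (k : Int) : matg_alt p k = rowsF p (k-1).toNat := by
  unfold matg_alt
  rw [pyRange_eq_intRange]
  have hm : (max k 1 - 0).toNat = (k-1).toNat + 1 := by omega
  rw [hm, intRange_eq_range, rowsF, List.map_map]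
  apply List.map_congr_left
  intro j _
  simp only [Function.comp_apply, zero_add]
  exact rowB_eq p j

-- ===== VERDICT (by name: the statement is the Claim_ definition above) =====
theorem matg_spec : Claim_equal_matg := by
  intro p k _
  unfold Spec_matg
  rw [matg_eq, matg_alt_eq]
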